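-- pv_equiv track=rewrite | github.com/yyxymint/PS | sec.py | hex_to_list
-- ===== SOURCE A (Python) =====
-- def hex_to_list(hx):
--     f_map={}
--     to=0
--     for i in '0123456789ABCDEF':
--         f_map[i]=to
--         to+=1
--
--     ll=[
--         [0,0,0,0],
--         [0,0,0,1],
--         [0,0,1,0],
--         [0,0,1,1],
--         [0,1,0,0],
--         [0,1,0,1],
--         [0,1,1,0],
--         [0,1,1,1],
--         [1,0,0,0],
--         [1,0,0,1],
--         [1,0,1,0],
--         [1,0,1,1],
--         [1,1,0,0],
--         [1,1,0,1],
--         [1,1,1,0],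
--         [1,1,1,1],
--     ]
--     return ll[f_map[hx[0]]]+ll[f_map[hx[1]]]
-- ===== SOURCE B (Python) =====
-- def hex_to_list(hx):
--     f_map = {}
--     to = 0
--     for i in '0123456789ABCDEF':
--         f_map[i] = to
--         to += 1
--     out = []
--     for c in (hx[0], hx[1]):
--         v = f_map[c]
--         bits = []
--         for _ in range(4):
--             bits.insert(0, v % 2)
--             v //= 2
--         out += bits
--     return out
-- ===== Notes on version B (the rewrite author's own statement) =====
-- stated objective: simpler
-- what changed: Removes the hard-coded 16-row bit table entirely: a single accumulator loop over the two digits computes each nibble's bits by repeated divmod-by-2, building the 4-bit group back-to-front, instead of indexing precomputed rows and concatenating them.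
import Mathlib
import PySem

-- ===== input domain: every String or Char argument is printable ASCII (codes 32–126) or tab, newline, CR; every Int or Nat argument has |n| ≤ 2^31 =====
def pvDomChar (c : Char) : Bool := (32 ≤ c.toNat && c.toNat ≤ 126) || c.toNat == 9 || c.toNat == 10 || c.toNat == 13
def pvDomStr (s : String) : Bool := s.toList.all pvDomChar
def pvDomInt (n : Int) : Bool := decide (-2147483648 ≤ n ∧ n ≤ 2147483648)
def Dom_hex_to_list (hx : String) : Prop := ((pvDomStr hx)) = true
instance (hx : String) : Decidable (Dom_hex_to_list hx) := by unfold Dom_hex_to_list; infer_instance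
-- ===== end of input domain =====

-- B drops the hard-coded 16-row bit table: one accumulator loop over the two digits derives each
-- nibble's bits by repeated divmod-by-2 built back-to-front (simpler).
-- ===== PORT A =====
-- the f_map built by A's loop over '0123456789ABCDEF'
def pvAMap : PySem.Dict Char Int :=
  ("0123456789ABCDEF".toList.foldl
    (fun (st : PySem.Dict Char Int × Int) i => (st.1.insert i st.2, st.2 + 1))
    (PySem.Dict.empty, 0)).1

def pvATable : List (List Int) :=
  [[0,0,0,0],[0,0,0,1],[0,0,1,0],[0,0,1,1],[0,1,0,0],[0,1,0,1],[0,1,1,0],[0,1,1,1],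
   [1,0,0,0],[1,0,0,1],[1,0,1,0],[1,0,1,1],[1,1,0,0],[1,1,0,1],[1,1,1,0],[1,1,1,1]]

def hex_to_list (hx : String) : List Int :=
  ((do
    let c0 ← PySem.Str.pyGet? hx 0
    let v0 ← pvAMap.get? c0
    let r0 ← PySem.List.pyGet? pvATable v0
    let c1 ← PySem.Str.pyGet? hx 1
    let v1 ← pvAMap.get? c1
    let r1 ← PySem.List.pyGet? pvATable v1
    pure (r0 ++ r1) : Option (List Int))).getD []

-- ===== PORT B =====
-- B builds the same digit map with the same loop
def pvBMap : PySem.Dict Char Int :=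
  ("0123456789ABCDEF".toList.foldl
    (fun (st : PySem.Dict Char Int × Int) i => (st.1.insert i st.2, st.2 + 1))
    (PySem.Dict.empty, 0)).1

-- Source B's inner 'for _ in range(4): bits.insert(0, v % 2); v //= 2' loop
def pvBits4 (v : Int) : List Int :=
  ((List.range 4).foldl
    (fun (st : List Int × Int) _ => (PySem.Int.mod st.2 2 :: st.1, PySem.Int.floordiv st.2 2))
    ([], v)).1

def hex_to_list_alt (hx : String) : List Int :=
  ((do
    let c0 ← PySem.Str.pyGet? hx 0
    let c1 ← PySem.Str.pyGet? hx 1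
    [c0, c1].foldlM (fun (out : List Int) c => do
      let v ← pvBMap.get? c
      pure (out ++ pvBits4 v)) [] : Option (List Int))).getD []

-- ===== PRECONDITION & SPEC =====
-- Pre_ excludes strings shorter than 2 chars (IndexError in A) and strings whose first two
-- chars are not uppercase hex digits (KeyError in A); A raises on exactly those inputs.
def Pre_hex_to_list (hx : String) : Prop :=
  2 ≤ hx.toList.length ∧
    hx.toList.getD 0 ' ' ∈ ['0','1','2','3','4','5','6','7','8','9','A','B','C','D','E','F'] ∧
    hx.toList.getD 1 ' ' ∈ ['0','1','2','3','4','5','6','7','8','9','A','B','C','D','E','F']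
instance (hx : String) : Decidable (Pre_hex_to_list hx) := by unfold Pre_hex_to_list; infer_instance
def pvWitness_hex_to_list : String := "A3"

def Spec_hex_to_list (hx : String) (out : List Int) : Prop := out = hex_to_list_alt hx
instance (hx : String) (out : List Int) : Decidable (Spec_hex_to_list hx out) := by unfold Spec_hex_to_list; infer_instance

-- ===== CLAIM (what is proved, stated in full; the proofs are below) =====
def Claim_equal_hex_to_list : Prop := ∀ (hx : String), Dom_hex_to_list hx → Pre_hex_to_list hx → Spec_hex_to_list hx (hex_to_list hx)

-- ===== LEMMAS AND PROOFS =====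
-- nibble value of a hex digit, for the proofs only
def pvNib (c : Char) : Int :=
  (PySem.List.index? ['0','1','2','3','4','5','6','7','8','9','A','B','C','D','E','F'] c).getD 0

lemma pv_maps_eq : pvBMap = pvAMap := rfl

lemma pv_get1 (c0 c1 : Char) (rest : List Char) : PySem.List.pyGet? (c0::c1::rest) 1 = some c1 := by
  rw [show (1:Int) = ((1:Nat):Int) by norm_num, PySem.List.pyGet?_natCast]; simp

-- per hex digit: A's dict lookup yields its nibble, and A's table row is exactly B's divmod bits
lemma pv_one : ∀ c ∈ ['0','1','2','3','4','5','6','7','8','9','A','B','C','D','E','F'],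
    pvAMap.get? c = some (pvNib c) ∧
    PySem.List.pyGet? pvATable (pvNib c) = some (pvBits4 (pvNib c)) := by
  intro c hc
  fin_cases hc <;> exact ⟨by decide, by decide⟩

-- ===== VERDICT (by name: the statement is the Claim_ definition above) =====
theorem hex_to_list_spec : Claim_equal_hex_to_list := by
  intro hx _ hpre
  unfold Spec_hex_to_list
  obtain ⟨hlen, hm0, hm1⟩ := hpre
  match h : hx.toList with
  | c0 :: c1 :: rest =>
    rw [h] at hm0 hm1
    simp only [List.getD] at hm0 hm1
    have h0 := pv_one c0 hm0
    have h1 := pv_one c1 hm1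
    simp only [hex_to_list, hex_to_list_alt, PySem.Str.pyGet?, PySem.Chars.pyGet?, h,
      PySem.List.pyGet?_zero_cons, pv_get1, pv_maps_eq, Option.bind_eq_bind, Option.bind_some,
      List.foldlM]
    rw [h0.1, h1.1]
    simp only [Option.bind]
    rw [h0.2, h1.2]
    simp
  | [] => rw [h] at hlen; simp at hlen
  | [c] => rw [h] at hlen; simp at hlen
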